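-- pv_equiv track=rewrite | github.com/tnvu4920/bmstu_iu7_sem5_course-project_computer-graphics | kursk/PRAKTIKA 2020/Code Prak/Lab_Graphic/Lab_02/Lab_02_Graphic.py | fx
-- ===== SOURCE A (Python) =====
-- def fx(x_t, b):
--     n = len(x_t)
--     h = int(n / 4)
--     f = [-x - b for x in x_t[0 : h]]
--     f.extend([x + b for x in x_t[h : 2 * h]])
--     f.extend([-x + b for x in x_t[2 * h : 3 * h]])
--     f.extend([x - b for x in x_t[3 * h: 4 * h]])
--     return f
-- ===== SOURCE B (Python) =====
-- def fx(x_t, b):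
--     # Exploits the half-period symmetry of the quadrant pattern: the element at
--     # position j + 2*h gets the SAME sign as the one at j but the OPPOSITE offset.
--     # One loop over the first half builds both output halves simultaneously.
--     h = int(len(x_t) / 4)
--     lo, hi = [], []
--     for j in range(2 * h):
--         s = -1 if j < h else 1
--         t = -b if j < h else b
--         lo.append(s * x_t[j] + t)
--         hi.append(s * x_t[j + 2 * h] - t)
--     return lo + hi
-- ===== Notes on version B (the rewrite author's own statement) =====
-- stated objective: alternative
-- what changed: B exploits the half-period symmetry of the quadrant pattern (position j+2h has the same sign as position j but the opposite offset): a single loop over only the first 2h indices builds the two output halves simultaneously in two accumulators, instead of A's four independent slice comprehensions.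
import Mathlib
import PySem

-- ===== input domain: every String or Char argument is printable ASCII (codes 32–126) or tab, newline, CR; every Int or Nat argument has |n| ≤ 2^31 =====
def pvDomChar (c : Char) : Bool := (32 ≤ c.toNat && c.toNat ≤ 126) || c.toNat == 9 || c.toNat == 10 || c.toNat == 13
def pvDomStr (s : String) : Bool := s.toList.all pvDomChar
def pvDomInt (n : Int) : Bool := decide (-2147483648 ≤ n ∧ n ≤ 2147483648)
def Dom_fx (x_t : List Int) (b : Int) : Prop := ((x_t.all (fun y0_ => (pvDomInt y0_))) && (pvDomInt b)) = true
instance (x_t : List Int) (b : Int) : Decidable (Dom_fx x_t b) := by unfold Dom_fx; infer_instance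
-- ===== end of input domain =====

-- B replaces A's four slice comprehensions by one loop over the FIRST HALF of the
-- truncated list that builds both output halves at once, using the symmetry that
-- index j+2h takes the same sign as index j but the opposite offset (objective: alternative).

-- ===== PORT A =====
-- int(n / 4) for n = len(x_t) ≥ 0 equals n // 4 (no float rounding for list lengths in scope)
def fx (x_t : List Int) (b : Int) : List Int :=
  let n : Int := PySem.List.len x_t
  let h : Int := PySem.Int.floordiv n 4
  ((PySem.List.slice x_t (some 0) (some h)).map (fun x => -x - b))
    ++ ((PySem.List.slice x_t (some h) (some (2 * h))).map (fun x => x + b))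
    ++ ((PySem.List.slice x_t (some (2 * h)) (some (3 * h))).map (fun x => -x + b))
    ++ ((PySem.List.slice x_t (some (3 * h)) (some (4 * h))).map (fun x => x - b))

-- ===== PORT B =====
-- x_t[j] and x_t[j + 2h] are always in range here (0 ≤ j < 2h, so j + 2h < 4h ≤ n),
-- so Python's list indexing is ported as pyGetD with default 0 (never used).
def fx_alt (x_t : List Int) (b : Int) : List Int :=
  let h : Int := PySem.Int.floordiv (PySem.List.len x_t) 4
  let p : List Int × List Int :=
    (PySem.List.pyRange 0 (2 * h) 1).foldl
      (fun (p : List Int × List Int) j =>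
        let s : Int := if j < h then -1 else 1
        let t : Int := if j < h then -b else b
        (p.1 ++ [s * PySem.List.pyGetD x_t j 0 + t],
         p.2 ++ [s * PySem.List.pyGetD x_t (j + 2 * h) 0 - t]))
      ([], [])
  p.1 ++ p.2

-- ===== PRECONDITION & SPEC =====
def Spec_fx (x_t : List Int) (b : Int) (out : List Int) : Prop := out = fx_alt x_t b
instance (x_t : List Int) (b : Int) (out : List Int) : Decidable (Spec_fx x_t b out) := by unfold Spec_fx; infer_instance

-- ===== CLAIM (what is proved, stated in full; the proofs are below) =====
def Claim_equal_fx : Prop := ∀ (x_t : List Int) (b : Int), Dom_fx x_t b → Spec_fx x_t b (fx x_t b)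

-- ===== LEMMAS AND PROOFS =====

-- B's loop: a fold appending one element to each accumulator is a pair of maps
lemma foldl_pair_append (l : List Int) (F G : Int → Int) (a c : List Int) :
    l.foldl (fun (p : List Int × List Int) j => (p.1 ++ [F j], p.2 ++ [G j])) (a, c)
    = (a ++ l.map F, c ++ l.map G) := by
  induction l generalizing a c with
  | nil => simp
  | cons x xs ih => simp [ih]

-- one chunk of B's pass: indices a+c .. a+c+m-1 read out (drop (a+c)).take m
lemma seg_map (xs : List Int) (g : Int → Int) (a m c : Nat) (hm : a + c + m ≤ xs.length) :
    (PySem.List.pyRange (a : Int) ((a : Int) + (m : Int)) 1).map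
      (fun i => g (PySem.List.pyGetD xs (i + (c : Int)) 0))
    = ((xs.drop (a + c)).take m).map g := by
  rw [PySem.List.pyRange_one]
  have hcast : (((a : Int) + (m : Int)) - (a : Int)).toNat = m := by omega
  rw [hcast]
  apply List.ext_getElem
  · simp; omega
  · intro k hk hk'
    simp only [List.map_map, List.getElem_map, List.getElem_range, Function.comp]
    have h1 : ((a : Int) + (k : Int) + (c : Int)) = ((a + k + c : Nat) : Int) := by push_cast; ring
    rw [h1, PySem.List.pyGetD_natCast]
    have hlt : a + k + c < xs.length := by
      simp [List.length_range] at hk; omega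
    rw [List.getD_eq_getElem xs 0 hlt]
    congr 1
    rw [List.getElem_take, List.getElem_drop]
    congr 1
    omega

-- ===== VERDICT =====
theorem fx_spec : Claim_equal_fx := by
  intro x_t b _
  unfold Spec_fx fx fx_alt
  simp only [PySem.List.len_eq]
  have hfd : PySem.Int.floordiv ((x_t.length : Int)) 4 = ((x_t.length / 4 : Nat) : Int) := by
    exact_mod_cast PySem.Int.floordiv_natCast x_t.length 4
  simp only [hfd]
  set h : Nat := x_t.length / 4 with hh
  have hle : 4 * h ≤ x_t.length := by omega
  -- B's fold is a pair of maps over range(2h)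
  rw [foldl_pair_append
        (PySem.List.pyRange 0 (2 * (h : Int)) 1)
        (fun j => (if j < (h : Int) then -1 else 1) * PySem.List.pyGetD x_t j 0
                    + (if j < (h : Int) then -b else b))
        (fun j => (if j < (h : Int) then -1 else 1) * PySem.List.pyGetD x_t (j + 2 * (h : Int)) 0
                    - (if j < (h : Int) then -b else b)) [] []]
  simp only [List.nil_append]
  -- split each map's range at h
  have hsplit : PySem.List.pyRange 0 (2 * (h : Int)) 1
      = PySem.List.pyRange 0 (h : Int) 1 ++ PySem.List.pyRange (h : Int) (2 * (h : Int)) 1 :=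
    PySem.List.pyRange_one_append 0 (h : Int) (2 * (h : Int)) (by positivity) (by omega)
  rw [hsplit, List.map_append, List.map_append]
  -- resolve the if inside each chunk and apply seg_map
  have lo0 : (PySem.List.pyRange 0 (h : Int) 1).map
      (fun j => (if j < (h : Int) then -1 else 1) * PySem.List.pyGetD x_t j 0
                  + (if j < (h : Int) then -b else b))
      = ((x_t.drop 0).take h).map (fun x => -x - b) := by
    have := seg_map x_t (fun x => -x - b) 0 h 0 (by omega)
    simp only [Nat.cast_zero, zero_add, add_zero] at this
    rw [← this]
    apply List.map_congr_left
    intro i hi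
    rw [PySem.List.mem_pyRange_one] at hi
    rw [if_pos hi.2, if_pos hi.2]; ring
  have lo1 : (PySem.List.pyRange (h : Int) (2 * (h : Int)) 1).map
      (fun j => (if j < (h : Int) then -1 else 1) * PySem.List.pyGetD x_t j 0
                  + (if j < (h : Int) then -b else b))
      = ((x_t.drop h).take h).map (fun x => x + b) := by
    have := seg_map x_t (fun x => x + b) h h 0 (by omega)
    simp only [Nat.cast_zero, add_zero] at this
    have e : (h : Int) + (h : Int) = 2 * (h : Int) := by ring
    rw [e] at this
    rw [← this]
    apply List.map_congr_left
    intro i hi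
    rw [PySem.List.mem_pyRange_one] at hi
    rw [if_neg (by omega), if_neg (by omega)]; ring
  have hi0 : (PySem.List.pyRange 0 (h : Int) 1).map
      (fun j => (if j < (h : Int) then -1 else 1) * PySem.List.pyGetD x_t (j + 2 * (h : Int)) 0
                  - (if j < (h : Int) then -b else b))
      = ((x_t.drop (2 * h)).take h).map (fun x => -x + b) := by
    have := seg_map x_t (fun x => -x + b) 0 h (2 * h) (by omega)
    simp only [Nat.cast_zero, zero_add] at this
    have e : ((2 * h : Nat) : Int) = 2 * (h : Int) := by push_cast; ring
    rw [e] at this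
    rw [← this]
    apply List.map_congr_left
    intro i hi
    rw [PySem.List.mem_pyRange_one] at hi
    rw [if_pos hi.2, if_pos hi.2]; ring_nf
  have hi1 : (PySem.List.pyRange (h : Int) (2 * (h : Int)) 1).map
      (fun j => (if j < (h : Int) then -1 else 1) * PySem.List.pyGetD x_t (j + 2 * (h : Int)) 0
                  - (if j < (h : Int) then -b else b))
      = ((x_t.drop (3 * h)).take h).map (fun x => x - b) := by
    have := seg_map x_t (fun x => x - b) h h (2 * h) (by omega)
    have e1 : ((2 * h : Nat) : Int) = 2 * (h : Int) := by push_cast; ring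
    have e2 : (h : Int) + (h : Int) = 2 * (h : Int) := by ring
    have e3 : h + 2 * h = 3 * h := by omega
    rw [e1, e2, e3] at this
    rw [← this]
    apply List.map_congr_left
    intro i hi
    rw [PySem.List.mem_pyRange_one] at hi
    rw [if_neg (by omega), if_neg (by omega)]; ring_nf
  -- A's side: slices to drop/take
  have s0 : PySem.List.slice x_t (some 0) (some (h : Int)) = (x_t.drop 0).take h := by
    have := PySem.List.slice_natCast (xs := x_t) (a := 0) (b := h)
    simp only [Nat.cast_zero, Nat.sub_zero] at this
    exact this
  have s1 : PySem.List.slice x_t (some (h : Int)) (some (2 * (h : Int))) = (x_t.drop h).take h := by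
    have := PySem.List.slice_natCast (xs := x_t) (a := h) (b := 2 * h)
    have e1 : ((2 * h : Nat) : Int) = 2 * (h : Int) := by push_cast; ring
    have e2 : 2 * h - h = h := by omega
    rw [e1, e2] at this; exact this
  have s2 : PySem.List.slice x_t (some (2 * (h : Int))) (some (3 * (h : Int))) = (x_t.drop (2 * h)).take h := by
    have := PySem.List.slice_natCast (xs := x_t) (a := 2 * h) (b := 3 * h)
    have e1 : ((2 * h : Nat) : Int) = 2 * (h : Int) := by push_cast; ring
    have e2 : ((3 * h : Nat) : Int) = 3 * (h : Int) := by push_cast; ring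
    have e3 : 3 * h - 2 * h = h := by omega
    rw [e1, e2, e3] at this; exact this
  have s3 : PySem.List.slice x_t (some (3 * (h : Int))) (some (4 * (h : Int))) = (x_t.drop (3 * h)).take h := by
    have := PySem.List.slice_natCast (xs := x_t) (a := 3 * h) (b := 4 * h)
    have e1 : ((3 * h : Nat) : Int) = 3 * (h : Int) := by push_cast; ring
    have e2 : ((4 * h : Nat) : Int) = 4 * (h : Int) := by push_cast; ring
    have e3 : 4 * h - 3 * h = h := by omega
    rw [e1, e2, e3] at this; exact this
  rw [s0, s1, s2, s3, lo0, lo1, hi0, hi1]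
  simp [List.append_assoc]
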